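-- pv_equiv track=rewrite | github.com/davidvonthenen/hybrid-rag-bm25-with-ai-governance | community_version/common/opensearch_client.py | combine_hits
-- ===== SOURCE A (Python) =====
-- from typing import Any, Dict, List, Optional, Tuple
--
-- def combine_hits(
--     hits_a: List[Dict[str, Any]],
--     hits_b: List[Dict[str, Any]],
--     top_k: int = 10,
-- ) -> List[Dict[str, Any]]:
--     """
--     Combine two per-store lists without pretending cross-store scores are comparable.
--
--     Policy: interleave A and B (stable) while preserving each list's order.
--     """
--     combined: List[Dict[str, Any]] = []
--     ia = ib = 0
--     while len(combined) < top_k and (ia < len(hits_a) or ib < len(hits_b)):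
--         if ia < len(hits_a):
--             combined.append(hits_a[ia])
--             ia += 1
--         if len(combined) >= top_k:
--             break
--         if ib < len(hits_b):
--             combined.append(hits_b[ib])
--             ib += 1
--     return combined
-- ===== SOURCE B (Python) =====
-- def combine_hits(hits_a, hits_b, top_k=10):
--     la, lb = len(hits_a), len(hits_b)
--     m = min(max(top_k, 0), la + lb)
--     lo = 2 * min(la, lb)
--
--     def pick(j):
--         if j < lo:
--             return hits_a[j // 2] if j % 2 == 0 else hits_b[j // 2]
--         return hits_a[j - lb] if la > lb else hits_b[j - la]
--
--     return [pick(j) for j in range(m)]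
-- ===== Notes on version B (the rewrite author's own statement) =====
-- stated objective: alternative
-- what changed: A's two-cursor while-loop that walks both lists alternately is replaced by a closed-form position-to-source mapping: output length m = min(max(top_k,0), la+lb) is computed up front and each output index j is fetched directly (a[j//2]/b[j//2] in the alternating zone, a[j-lb] or b[j-la] in the tail) by random access, with no cursors or sequential state.
import Mathlib
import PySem

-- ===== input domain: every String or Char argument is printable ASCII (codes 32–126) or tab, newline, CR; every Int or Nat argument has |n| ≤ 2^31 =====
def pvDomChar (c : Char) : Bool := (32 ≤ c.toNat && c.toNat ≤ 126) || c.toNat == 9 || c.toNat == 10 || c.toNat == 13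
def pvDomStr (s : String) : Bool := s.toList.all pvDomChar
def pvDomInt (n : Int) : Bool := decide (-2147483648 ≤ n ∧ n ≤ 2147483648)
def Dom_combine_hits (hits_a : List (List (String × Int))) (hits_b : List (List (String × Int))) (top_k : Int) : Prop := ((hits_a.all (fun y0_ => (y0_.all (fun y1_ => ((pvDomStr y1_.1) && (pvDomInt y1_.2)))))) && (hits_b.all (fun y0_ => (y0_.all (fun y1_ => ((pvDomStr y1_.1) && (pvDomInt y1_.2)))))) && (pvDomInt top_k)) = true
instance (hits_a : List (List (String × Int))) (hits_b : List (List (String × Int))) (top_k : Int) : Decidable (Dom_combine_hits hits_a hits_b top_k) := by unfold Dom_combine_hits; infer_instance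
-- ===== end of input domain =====

-- B replaces A's two-cursor while-loop by a closed-form position-to-source mapping: it computes the output length up front and fetches each output index directly by random access (objective: alternative; same asymptotic cost).


-- ===== PORT A =====
-- A's while-loop: 'combined' accumulator, ia/ib modelled by consuming the lists.
def combine_hits_loop (ha hb : List (List (String × Int))) (combined : List (List (String × Int))) (top_k : Int) : List (List (String × Int)) :=
  if (combined.length : Int) < top_k ∧ (ha ≠ [] ∨ hb ≠ []) then
    match ha with
    | x :: ha' =>
      let combined := combined ++ [x]
      if (combined.length : Int) ≥ top_k then combined
      else
        match hb with
        | y :: hb' => combine_hits_loop ha' hb' (combined ++ [y]) top_k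
        | [] => combine_hits_loop ha' [] combined top_k
    | [] =>
      match hb with
      | y :: hb' => combine_hits_loop [] hb' (combined ++ [y]) top_k
      | [] => combined
  else combined
termination_by ha.length + hb.length
decreasing_by all_goals (simp_all; try omega)

def combine_hits (hits_a : List (List (String × Int))) (hits_b : List (List (String × Int))) (top_k : Int) : List (List (String × Int)) :=
  combine_hits_loop hits_a hits_b [] top_k

-- ===== PORT B =====
-- B's pick(j): which source list and which position output index j comes from.
-- The Python indexes hits_a[...] / hits_b[...] directly; every index pick is called with
-- is in range (j ranges over range(m), m ≤ la+lb), so '.getD []' after pyGet? is never the default.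
def combine_hits_pick (hits_a : List (List (String × Int))) (hits_b : List (List (String × Int))) (j : Nat) : List (String × Int) :=
  if j < 2 * min hits_a.length hits_b.length then
    if j % 2 = 0 then (PySem.List.pyGet? hits_a ((j / 2 : Nat) : Int)).getD []
    else (PySem.List.pyGet? hits_b ((j / 2 : Nat) : Int)).getD []
  else if hits_b.length < hits_a.length then
    (PySem.List.pyGet? hits_a ((j : Int) - hits_b.length)).getD []
  else (PySem.List.pyGet? hits_b ((j : Int) - hits_a.length)).getD []

-- B: m = min(max(top_k,0), la+lb); [pick(j) for j in range(m)].
def combine_hits_alt (hits_a : List (List (String × Int))) (hits_b : List (List (String × Int))) (top_k : Int) : List (List (String × Int)) :=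
  let m : Int := min (max top_k 0) (hits_a.length + hits_b.length)
  (List.range m.toNat).map (combine_hits_pick hits_a hits_b)

-- ===== PRECONDITION & SPEC =====
def Spec_combine_hits (hits_a : List (List (String × Int))) (hits_b : List (List (String × Int))) (top_k : Int) (out : List (List (String × Int))) : Prop := out = combine_hits_alt hits_a hits_b top_k
instance (hits_a : List (List (String × Int))) (hits_b : List (List (String × Int))) (top_k : Int) (out : List (List (String × Int))) : Decidable (Spec_combine_hits hits_a hits_b top_k out) := by unfold Spec_combine_hits; infer_instance

-- ===== CLAIM =====
def Claim_equal_combine_hits : Prop := ∀ (hits_a : List (List (String × Int))) (hits_b : List (List (String × Int))) (top_k : Int), Dom_combine_hits hits_a hits_b top_k → Spec_combine_hits hits_a hits_b top_k (combine_hits hits_a hits_b top_k)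

-- ===== LEMMAS AND PROOFS =====
-- the interleaving A computes (before truncation)
def itl : List (List (String × Int)) → List (List (String × Int)) → List (List (String × Int))
  | x :: xs, y :: ys => x :: y :: itl xs ys
  | x :: xs, [] => x :: xs
  | [], ys => ys

theorem itl_nil_right (xs : List (List (String × Int))) : itl xs [] = xs := by
  cases xs <;> rfl

theorem loop_eq_take (ha hb combined : List (List (String × Int))) (k : Int) :
    combine_hits_loop ha hb combined k = combined ++ (itl ha hb).take (k - combined.length).toNat := by
  induction hn : ha.length + hb.length using Nat.strong_induction_on generalizing ha hb combined with
  | _ n ih =>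
  subst hn
  unfold combine_hits_loop
  by_cases hk : (combined.length : Int) < k
  · match ha, hb with
    | [], [] => simp [itl, hk]
    | [], y :: hb' =>
      rw [if_pos ⟨hk, Or.inr (by simp)⟩]
      dsimp only
      rw [ih hb'.length (by simp) [] hb' (combined ++ [y]) (by simp)]
      have h1 : (k - ↑combined.length).toNat = ((k - (↑(combined ++ [y]).length)).toNat + 1) := by
        simp; omega
      simp only [itl, h1, List.take_succ_cons]
      simp
    | x :: ha', hb =>
      rw [if_pos ⟨hk, Or.inl (by simp)⟩]
      dsimp only
      by_cases hk2 : ((combined ++ [x]).length : Int) ≥ k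
      · have h1 : (k - (combined.length : Int)).toNat = 1 := by simp at hk2; omega
        rw [if_pos hk2, h1]
        match hb with
        | [] => simp [itl]
        | y :: hb' => simp [itl]
      · rw [if_neg hk2]
        match hb with
        | [] =>
          dsimp only
          rw [ih ha'.length (by simp) ha' [] (combined ++ [x]) (by simp)]
          have h1 : (k - ↑combined.length).toNat = ((k - (↑(combined ++ [x]).length)).toNat + 1) := by
            simp at hk2 ⊢; omega
          simp only [itl_nil_right, h1, List.take_succ_cons]
          simp
        | y :: hb' =>
          dsimp only
          rw [ih (ha'.length + hb'.length) (by simp; omega) ha' hb' (combined ++ [x] ++ [y]) (by simp)]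
          have h1 : (k - ↑combined.length).toNat = ((k - (↑(combined ++ [x] ++ [y]).length)).toNat + 1 + 1) := by
            simp at hk2 ⊢; omega
          simp only [itl, h1, List.take_succ_cons]
          simp
  · have h0 : (k - (combined.length : Int)).toNat = 0 := by omega
    simp [hk, h0]

-- reading a whole list off by index
theorem map_get_range (l : List (List (String × Int))) :
    (List.range l.length).map (fun j => l[j]?.getD []) = l := by
  apply List.ext_getElem
  · simp
  · intro i h1 h2
    simp at h1
    simp [h1]

-- B's index map reproduces the interleaving
theorem itl_eq_map_pick (a b : List (List (String × Int))) :
    itl a b = (List.range (a.length + b.length)).map (combine_hits_pick a b) := by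
  induction a generalizing b with
  | nil =>
    simp only [itl, List.length_nil, Nat.zero_add]
    have : ∀ j : Nat, combine_hits_pick [] b j = b[j]?.getD [] := by
      intro j
      simp [combine_hits_pick]
    rw [funext this] -- pointwise equal for all j
    exact (map_get_range b).symm
  | cons x xs ih =>
    cases b with
    | nil =>
      simp only [itl_nil_right, List.length_cons, List.length_nil, Nat.add_zero]
      have : ∀ j : Nat, combine_hits_pick (x :: xs) [] j = (x :: xs)[j]?.getD [] := by
        intro j
        simp [combine_hits_pick]
      rw [funext this]
      exact (map_get_range (x :: xs)).symm
    | cons y ys =>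
      have hlen : (x :: xs).length + (y :: ys).length = xs.length + ys.length + 1 + 1 := by
        simp; omega
      rw [hlen, List.range_succ_eq_map, List.range_succ_eq_map]
      simp only [itl, List.map_cons, List.map_map]
      have h0 : combine_hits_pick (x :: xs) (y :: ys) 0 = x := by
        simp [combine_hits_pick]
      have h1 : combine_hits_pick (x :: xs) (y :: ys) (Nat.succ 0) = y := by
        have hc : (Nat.succ 0) < 2 * min (x :: xs).length (y :: ys).length := by
          simp [Nat.succ_min_succ]; omega
        rw [combine_hits_pick, if_pos hc]
        simp
      rw [h0, h1, ih ys]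
      congr 1
      congr 1
      apply List.map_congr_left
      intro i hi
      simp only [List.mem_range] at hi
      show combine_hits_pick xs ys i = combine_hits_pick (x :: xs) (y :: ys) (i + 1 + 1)
      symm
      simp only [combine_hits_pick, List.length_cons, Nat.succ_min_succ]
      have hmod : (i + 1 + 1) % 2 = i % 2 := by omega
      have hdiv : (i + 1 + 1) / 2 = i / 2 + 1 := by omega
      by_cases hz : i < 2 * min xs.length ys.length
      · have hz' : i + 1 + 1 < 2 * (min xs.length ys.length + 1) := by omega
        rw [if_pos hz', if_pos hz, hmod, hdiv]
        by_cases he : i % 2 = 0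
        · rw [if_pos he, if_pos he]
          simp only [PySem.List.pyGet?_natCast, List.getElem?_cons_succ]
        · rw [if_neg he, if_neg he]
          simp only [PySem.List.pyGet?_natCast, List.getElem?_cons_succ]
      · have hz' : ¬ (i + 1 + 1 < 2 * (min xs.length ys.length + 1)) := by omega
        rw [if_neg hz', if_neg hz]
        by_cases hlt : ys.length < xs.length
        · have hlt' : ys.length + 1 < xs.length + 1 := by omega
          rw [if_pos hlt', if_pos hlt]
          have hge : ys.length ≤ i := by omega
          have e1 : ((i + 1 + 1 : Nat) : Int) - ((ys.length + 1 : Nat) : Int) = ((i - ys.length + 1 : Nat) : Int) := by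
            omega
          have e2 : ((i : Nat) : Int) - ((ys.length : Nat) : Int) = ((i - ys.length : Nat) : Int) := by
            omega
          rw [e1, e2]
          simp
        · have hlt' : ¬ (ys.length + 1 < xs.length + 1) := by omega
          rw [if_neg hlt', if_neg hlt]
          have hge : xs.length ≤ i := by omega
          have e1 : ((i + 1 + 1 : Nat) : Int) - ((xs.length + 1 : Nat) : Int) = ((i - xs.length + 1 : Nat) : Int) := by
            omega
          have e2 : ((i : Nat) : Int) - ((xs.length : Nat) : Int) = ((i - xs.length : Nat) : Int) := by
            omega
          rw [e1, e2]
          simp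

-- ===== VERDICT =====
theorem combine_hits_spec : Claim_equal_combine_hits := by
  intro ha hb k _
  unfold Spec_combine_hits combine_hits combine_hits_alt
  rw [loop_eq_take]
  simp only [List.nil_append, List.length_nil, Int.natCast_zero, Int.sub_zero]
  set m : Int := min (max k 0) (↑ha.length + ↑hb.length) with hm
  have hmnat : m.toNat = min k.toNat (ha.length + hb.length) := by omega
  rw [itl_eq_map_pick]
  -- take k.toNat of the full index map = index map over range m
  have hclamp : ((List.range (ha.length + hb.length)).map (combine_hits_pick ha hb)).take k.toNat
      = (List.range m.toNat).map (combine_hits_pick ha hb) := by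
    rw [← List.map_take, List.take_range, hmnat]
  exact hclamp
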